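-- pv_equiv track=rewrite | github.com/jovans2/DeathStarBench_TestScripts | TestLoadsCNN.py | EnforceActivityWindow
-- ===== SOURCE A (Python) =====
-- def EnforceActivityWindow(start_time, end_time, instance_events):
--     events_iit = []
--     events_abs = [0] + instance_events
--     event_times = [sum(events_abs[:i]) for i in range(1, len(events_abs) + 1)]
--     event_times = [e for e in event_times if (e > start_time) and (e < end_time)]
--     try:
--         events_iit = [event_times[0]] + [event_times[i] - event_times[i - 1]
--                                          for i in range(1, len(event_times))]
--     except:
--         pass
--     return events_iit
-- ===== SOURCE B (Python) =====
-- def EnforceActivityWindow(start_time, end_time, instance_events):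
--     # One pass: running prefix sum, filter to the window, emit inter-arrival
--     # times on the fly (O(n) instead of A's O(n^2) re-summed slices).
--     out = []
--     total = 0
--     prev = None
--     for e in [0] + instance_events:
--         total += e
--         if start_time < total < end_time:
--             out.append(total if prev is None else total - prev)
--             prev = total
--     return out
-- ===== Notes on version B (the rewrite author's own statement) =====
-- stated objective: faster
-- what changed: Replaces A's quadratic list of re-summed slices plus separate filter and indexed-difference comprehensions with a single pass that maintains a running prefix sum and the previous in-window time, emitting each inter-arrival time immediately.
import Mathlib
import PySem

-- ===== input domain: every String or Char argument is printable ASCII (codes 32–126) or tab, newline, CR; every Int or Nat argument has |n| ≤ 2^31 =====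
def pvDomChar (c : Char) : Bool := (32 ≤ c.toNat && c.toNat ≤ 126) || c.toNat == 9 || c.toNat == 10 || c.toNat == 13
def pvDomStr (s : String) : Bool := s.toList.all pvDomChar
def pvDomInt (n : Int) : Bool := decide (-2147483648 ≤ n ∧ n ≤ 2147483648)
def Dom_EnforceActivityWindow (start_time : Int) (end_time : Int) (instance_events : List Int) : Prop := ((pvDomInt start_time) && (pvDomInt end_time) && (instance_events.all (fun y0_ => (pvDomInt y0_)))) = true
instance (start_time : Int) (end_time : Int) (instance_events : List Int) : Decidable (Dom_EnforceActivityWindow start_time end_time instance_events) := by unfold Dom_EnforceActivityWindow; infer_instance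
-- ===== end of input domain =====

-- B replaces A's O(n^2) re-summed slices with one O(n) running-prefix-sum pass (objective: faster).

-- ===== PORT A =====
-- Literal port of A. The try/except: the only raising expression is event_times[0]
-- on an empty filtered list (the comprehension's indices i, i-1 are always in range),
-- so the except-branch (events_iit stays []) is exactly the [] case of the match.
def EnforceActivityWindow (start_time : Int) (end_time : Int) (instance_events : List Int) : List Int :=
  let events_abs : List Int := 0 :: instance_events
  let event_times : List Int :=
    (PySem.List.pyRange 1 ((events_abs.length : Int) + 1) 1).map
      (fun i => (PySem.List.slice events_abs none (some i)).sum)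
  let event_times : List Int :=
    event_times.filter (fun e => decide (start_time < e) && decide (e < end_time))
  match event_times with
  | [] => []
  | h :: _ =>
      h :: (PySem.List.pyRange 1 (event_times.length : Int) 1).map
        (fun i => PySem.List.pyGetD event_times i 0 - PySem.List.pyGetD event_times (i - 1) 0)

-- ===== PORT B =====
-- Literal port of Source B: one fold over [0] + instance_events with state (total, prev, out).
def EnforceActivityWindow_alt (start_time : Int) (end_time : Int) (instance_events : List Int) : List Int :=
  ((0 :: instance_events).foldl
    (fun (st : Int × Option Int × List Int) e =>
      let total := st.1 + e
      if start_time < total ∧ total < end_time then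
        (total, some total,
          st.2.2 ++ [match st.2.1 with | none => total | some p => total - p])
      else (total, st.2.1, st.2.2))
    (0, none, [])).2.2

-- ===== PRECONDITION & SPEC =====
def Spec_EnforceActivityWindow (start_time : Int) (end_time : Int) (instance_events : List Int) (out : List Int) : Prop := out = EnforceActivityWindow_alt start_time end_time instance_events
instance (start_time : Int) (end_time : Int) (instance_events : List Int) (out : List Int) : Decidable (Spec_EnforceActivityWindow start_time end_time instance_events out) := by unfold Spec_EnforceActivityWindow; infer_instance

-- ===== CLAIM (what is proved, stated in full; the proofs are below) =====
def Claim_equal_EnforceActivityWindow : Prop := ∀ (start_time : Int) (end_time : Int) (instance_events : List Int), Dom_EnforceActivityWindow start_time end_time instance_events → Spec_EnforceActivityWindow start_time end_time instance_events (EnforceActivityWindow start_time end_time instance_events)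

-- ===== LEMMAS AND PROOFS =====

/-- Reference: inter-arrival times of a list given the previous in-window time. -/
def pvDiffs : Option Int → List Int → List Int
  | _, [] => []
  | prev, h :: t => (match prev with | none => h | some p => h - p) :: pvDiffs (some h) t

/-- Reference: running prefix sums starting from accumulator `s` (one value per element). -/
def pvPSums : Int → List Int → List Int
  | _, [] => []
  | s, e :: es => (s + e) :: pvPSums (s + e) es

theorem pvPSums_eq_map_range (xs : List Int) (s : Int) :
    (List.range xs.length).map (fun k => s + (xs.take (k + 1)).sum) = pvPSums s xs := by
  induction xs generalizing s with
  | nil => simp [pvPSums]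
  | cons e es ih =>
    simp only [List.length_cons, List.range_succ_eq_map, List.map_cons, List.map_map]
    refine congrArg₂ _ (by simp) ?_
    rw [← ih (s + e)]
    refine List.map_congr_left (fun k _ => ?_)
    simp [List.take_succ_cons, add_assoc]

theorem pvDiffs_eq_map_range (t : List Int) (h : Int) :
    (List.range t.length).map
        (fun k => (h :: t).getD (k + 1) 0 - (h :: t).getD k 0) = pvDiffs (some h) t := by
  induction t generalizing h with
  | nil => simp [pvDiffs]
  | cons x r ih =>
    simp only [List.length_cons, List.range_succ_eq_map, List.map_cons, List.map_map]
    rw [pvDiffs]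
    refine congrArg₂ _ (by simp) ?_
    show _ = pvDiffs (some x) r
    rw [← ih x]
    exact List.map_congr_left (fun k _ => by simp)

theorem pvFold_B (start_time end_time : Int) (es : List Int) (s : Int) (prev : Option Int)
    (out : List Int) :
    (es.foldl
      (fun (st : Int × Option Int × List Int) e =>
        let total := st.1 + e
        if start_time < total ∧ total < end_time then
          (total, some total,
            st.2.2 ++ [match st.2.1 with | none => total | some p => total - p])
        else (total, st.2.1, st.2.2))
      (s, prev, out)).2.2
    = out ++ pvDiffs prev ((pvPSums s es).filter
        (fun e => decide (start_time < e) && decide (e < end_time))) := by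
  induction es generalizing s prev out with
  | nil => simp [pvPSums, pvDiffs]
  | cons e es ih =>
    simp only [List.foldl_cons, pvPSums, List.filter_cons]
    by_cases hc : start_time < s + e ∧ s + e < end_time
    · simp only [if_pos hc, decide_eq_true hc.1, decide_eq_true hc.2, Bool.and_self, ih,
        List.append_assoc]
      cases prev <;> simp [pvDiffs]
    · rcases Decidable.not_and_iff_not_or_not.mp hc with h1 | h1 <;>
        simp [if_neg hc, decide_eq_false h1, ih]

theorem pvAltEq (start_time end_time : Int) (instance_events : List Int) :
    EnforceActivityWindow_alt start_time end_time instance_events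
    = pvDiffs none ((pvPSums 0 (0 :: instance_events)).filter
        (fun e => decide (start_time < e) && decide (e < end_time))) := by
  unfold EnforceActivityWindow_alt
  exact pvFold_B start_time end_time (0 :: instance_events) 0 none []

theorem pvEventTimesEq (xs : List Int) :
    (PySem.List.pyRange 1 ((xs.length : Int) + 1) 1).map
        (fun i => (PySem.List.slice xs none (some i)).sum) = pvPSums 0 xs := by
  rw [PySem.List.pyRange_one, List.map_map]
  have hlen : (((xs.length : Int) + 1 - 1).toNat) = xs.length := by omega
  rw [hlen, ← pvPSums_eq_map_range xs 0]
  refine List.map_congr_left (fun k _ => ?_)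
  simp only [Function.comp_apply]
  have h1 : (1 : Int) + (k : Int) = ((k + 1 : Nat) : Int) := by push_cast; ring
  rw [h1, PySem.List.slice_to_natCast]
  simp

theorem EnforceActivityWindow_eq (start_time end_time : Int) (instance_events : List Int) :
    EnforceActivityWindow start_time end_time instance_events
    = EnforceActivityWindow_alt start_time end_time instance_events := by
  rw [pvAltEq]
  simp only [EnforceActivityWindow]
  rw [pvEventTimesEq (0 :: instance_events)]
  cases hts : (pvPSums 0 (0 :: instance_events)).filter
      (fun e => decide (start_time < e) && decide (e < end_time)) with
  | nil => simp [pvDiffs]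
  | cons h t =>
    simp only [pvDiffs]
    refine congrArg₂ _ rfl ?_
    rw [PySem.List.pyRange_one, List.map_map, ← pvDiffs_eq_map_range t h]
    have hlen : (((h :: t).length : Int) - 1).toNat = t.length := by
      simp [List.length_cons]
    rw [hlen]
    refine List.map_congr_left (fun k _ => ?_)
    simp only [Function.comp_apply]
    have h1 : (1 : Int) + (k : Int) = ((k + 1 : Nat) : Int) := by push_cast; ring
    have h2 : ((k + 1 : Nat) : Int) - 1 = ((k : Nat) : Int) := by push_cast; ring
    rw [h1, h2, PySem.List.pyGetD_natCast, PySem.List.pyGetD_natCast]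

-- ===== VERDICT (by name: the statement is the Claim_ definition above) =====
theorem EnforceActivityWindow_spec : Claim_equal_EnforceActivityWindow := by
  intro start_time end_time instance_events _
  exact (EnforceActivityWindow_eq start_time end_time instance_events).symm ▸ rfl
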